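-- pv_equiv track=rewrite | github.com/DanRoc23/codecademy | Hurricanes_project_more_ways_to_solve_it.py | greatest_numbers_of_deaths
-- ===== SOURCE A (Python) =====
-- from collections import defaultdict
--
-- def greatest_numbers_of_deaths(hurricanes_dict):
--   deaths = defaultdict(int)
--   for cane in hurricanes_dict:
--       max_death = hurricanes_dict.get(cane).get("Deaths")
--       deaths[cane] += max_death
--
--   max_key = max(deaths, key=deaths.get)
--   max_num = max(deaths.values())
--   return max_key, max_num
-- ===== SOURCE B (Python) =====
-- def greatest_numbers_of_deaths(hurricanes_dict):
--     best_key = None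
--     best_num = None
--     for cane, data in hurricanes_dict.items():
--         num = data["Deaths"]
--         if best_num is None or num > best_num:
--             best_key, best_num = cane, num
--     if best_key is None:
--         raise ValueError("max() arg is an empty sequence")
--     return best_key, best_num
-- ===== Notes on version B (the rewrite author's own statement) =====
-- stated objective: simpler
-- what changed: Replaces the defaultdict accumulation plus two separate max() passes (one keyed over the keys, one over the values) by a single argmax pass that keeps (best_key, best_num), updating only on a strictly greater value so ties keep the first key like max().
import Mathlib
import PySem

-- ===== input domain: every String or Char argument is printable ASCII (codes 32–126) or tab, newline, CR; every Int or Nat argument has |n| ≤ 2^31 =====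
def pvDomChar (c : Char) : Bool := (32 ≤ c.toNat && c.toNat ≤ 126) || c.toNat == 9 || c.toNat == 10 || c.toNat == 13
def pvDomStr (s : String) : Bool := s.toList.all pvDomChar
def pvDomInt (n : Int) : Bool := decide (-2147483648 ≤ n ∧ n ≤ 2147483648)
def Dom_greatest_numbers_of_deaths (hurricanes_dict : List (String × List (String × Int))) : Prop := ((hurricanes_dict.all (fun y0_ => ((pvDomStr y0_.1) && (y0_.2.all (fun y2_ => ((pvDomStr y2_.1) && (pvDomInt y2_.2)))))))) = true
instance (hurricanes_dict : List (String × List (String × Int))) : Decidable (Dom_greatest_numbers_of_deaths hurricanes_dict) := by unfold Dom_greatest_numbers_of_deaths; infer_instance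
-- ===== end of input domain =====

-- B replaces A's defaultdict accumulation and two max() passes by one single-pass argmax loop; proved equal on non-empty duplicate-free dicts whose entries all carry a "Deaths" key.


-- ===== PORT A =====
-- 'for cane in hurricanes_dict' iterates the dict's keys: we fold over the entries using only the key component p.1
-- and re-look the value up through the dict, exactly as 'hurricanes_dict.get(cane)' does.  'max(deaths, key=deaths.get)'
-- is max? over the keys with the looked-up count as key, 'max(deaths.values())' is max? over the values (on Pre_ the
-- dict is non-empty and every key is present, so the .getD defaults are never the result — Python raises there instead).
def greatest_numbers_of_deaths (hurricanes_dict : List (String × List (String × Int))) : String × Int :=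
  let deaths : PySem.Dict String Int :=
    hurricanes_dict.foldl
      (fun d p =>
        d.insert p.1 (d.getD p.1 0 + ((PySem.Dict.mk (((PySem.Dict.mk hurricanes_dict).get? p.1).getD [])).get? "Deaths").getD 0))
      PySem.Dict.empty
  let max_key := (PySem.List.max? deaths.keys (fun k => deaths.getD k 0)).getD ""
  let max_num := (PySem.List.max? deaths.values (fun v => v)).getD 0
  (max_key, max_num)

-- ===== PORT B =====
-- single argmax pass over .items(); Option (String × Int) is (best_key, best_num), none = both still None
def altLoop : List (String × List (String × Int)) → Option (String × Int) → Option (String × Int)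
  | [], best => best
  | (cane, data) :: rest, best =>
      let num := ((PySem.Dict.mk data).get? "Deaths").getD 0
      match best with
      | none => altLoop rest (some (cane, num))
      | some b => altLoop rest (if b.2 < num then some (cane, num) else some b)

def greatest_numbers_of_deaths_alt (hurricanes_dict : List (String × List (String × Int))) : String × Int :=
  (altLoop hurricanes_dict none).getD ("", 0)

-- ===== PRECONDITION & SPEC =====
-- Pre_ excludes: the empty dict (A's max() raises ValueError; B raises ValueError too); entries whose value has no
-- "Deaths" key (A raises TypeError adding None, B raises KeyError); and association lists with duplicate keys (outer
-- or inner), which do not represent a Python dict — there any value is an artefact of the list-to-dict collapse.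
def Pre_greatest_numbers_of_deaths (hurricanes_dict : List (String × List (String × Int))) : Prop :=
  hurricanes_dict ≠ [] ∧ (hurricanes_dict.map Prod.fst).Nodup ∧
  ∀ p ∈ hurricanes_dict, "Deaths" ∈ p.2.map Prod.fst ∧ (p.2.map Prod.fst).Nodup
instance (hurricanes_dict : List (String × List (String × Int))) : Decidable (Pre_greatest_numbers_of_deaths hurricanes_dict) := by unfold Pre_greatest_numbers_of_deaths; infer_instance

def pvWitness_greatest_numbers_of_deaths : (List (String × List (String × Int))) :=
  [("Katrina", [("Deaths", 1836)]), ("Andrew", [("Deaths", 65)])]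

def Spec_greatest_numbers_of_deaths (hurricanes_dict : List (String × List (String × Int))) (out : String × Int) : Prop := out = greatest_numbers_of_deaths_alt hurricanes_dict
instance (hurricanes_dict : List (String × List (String × Int))) (out : String × Int) : Decidable (Spec_greatest_numbers_of_deaths hurricanes_dict out) := by unfold Spec_greatest_numbers_of_deaths; infer_instance

-- ===== CLAIM (what is proved, stated in full; the proofs are below) =====
def Claim_equal_greatest_numbers_of_deaths : Prop := ∀ (hurricanes_dict : List (String × List (String × Int))), Dom_greatest_numbers_of_deaths hurricanes_dict → Pre_greatest_numbers_of_deaths hurricanes_dict → Spec_greatest_numbers_of_deaths hurricanes_dict (greatest_numbers_of_deaths hurricanes_dict)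

-- ===== LEMMAS AND PROOFS =====

-- the per-entry death count both ports extract
def dOf (data : List (String × Int)) : Int := ((PySem.Dict.mk data).get? "Deaths").getD 0
-- the association list A's deaths-dict ends up holding (keys in order with their counts)
def pairsOf (h : List (String × List (String × Int))) : List (String × Int) :=
  h.map (fun p => (p.1, dOf p.2))
-- step of the argmax fold (= PySem.List.max? with key Prod.snd; also what altLoop does on pairsOf)
def amStep (a : Option (String × Int)) (p : String × Int) : Option (String × Int) :=
  match a with | none => some p | some m => if m.2 < p.2 then some p else some m

lemma max?_key_eq (xs : List String) (key : String → Int) : PySem.List.max? xs key =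
    List.foldl (fun a k => match a with | none => some k | some m => if key m < key k then some k else some m) none xs := by
  show List.foldl _ none xs = _
  congr 1; funext a k; cases a <;> rfl

lemma max?_int_eq (xs : List Int) : PySem.List.max? xs (fun v => v) =
    List.foldl (fun a v => match a with | none => some v | some m => if m < v then some v else some m) none xs := by
  show List.foldl _ none xs = _
  congr 1; funext a k; cases a <;> rfl

lemma fold_fst (key : String → Int) :
  ∀ (ps : List (String × Int)) (acc : Option (String × Int)),
  (∀ p ∈ ps, key p.1 = p.2) → (∀ q, acc = some q → key q.1 = q.2) →
  List.foldl (fun a k => match a with | none => some k | some m => if key m < key k then some k else some m)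
      (Option.map Prod.fst acc) (ps.map Prod.fst)
  = Option.map Prod.fst (List.foldl amStep acc ps) := by
  intro ps
  induction ps with
  | nil => intro acc _ _; simp
  | cons x t ih =>
    intro acc hk hacc
    simp only [List.map_cons, List.foldl_cons]
    match acc with
    | none =>
      have := ih (some x) (fun p hp => hk p (List.mem_cons_of_mem _ hp))
        (fun q hq => by cases hq; exact hk x List.mem_cons_self)
      simpa [amStep] using this
    | some m =>
      have hm : key m.1 = m.2 := hacc m rfl
      have hx : key x.1 = x.2 := hk x List.mem_cons_self
      simp only [Option.map_some, amStep, hm, hx]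
      by_cases hlt : m.2 < x.2
      · simp only [if_pos hlt]
        have := ih (some x) (fun p hp => hk p (List.mem_cons_of_mem _ hp))
          (fun q hq => by cases hq; exact hx)
        simpa [amStep, if_pos hlt] using this
      · simp only [if_neg hlt]
        have := ih (some m) (fun p hp => hk p (List.mem_cons_of_mem _ hp))
          (fun q hq => by cases hq; exact hm)
        simpa [amStep, if_neg hlt] using this

lemma fold_snd :
  ∀ (ps : List (String × Int)) (acc : Option (String × Int)),
  List.foldl (fun a v => match a with | none => some v | some m => if m < v then some v else some m)
      (Option.map Prod.snd acc) (ps.map Prod.snd)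
  = Option.map Prod.snd (List.foldl amStep acc ps) := by
  intro ps
  induction ps with
  | nil => intro acc; simp
  | cons x t ih =>
    intro acc
    simp only [List.map_cons, List.foldl_cons]
    match acc with
    | none => simpa [amStep] using ih (some x)
    | some m =>
      simp only [Option.map_some, amStep]
      by_cases hlt : m.2 < x.2
      · simpa [amStep, if_pos hlt] using ih (some x)
      · simpa [amStep, if_neg hlt] using ih (some m)

lemma fold_some : ∀ (ps : List (String × Int)) (q : String × Int),
    ∃ r, List.foldl amStep (some q) ps = some r := by
  intro ps
  induction ps with
  | nil => exact fun q => ⟨q, rfl⟩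
  | cons x t ih =>
    intro q
    simp only [List.foldl_cons, amStep]
    by_cases hlt : q.2 < x.2
    · simpa [if_pos hlt] using ih x
    · simpa [if_neg hlt] using ih q

-- A's dict-building loop: over fresh distinct keys it just appends (key, count) pairs
lemma items_fold (h : List (String × List (String × Int))) :
  ∀ (t : List (String × List (String × Int))) (d : PySem.Dict String Int),
  (∀ p ∈ t, (PySem.Dict.mk h).get? p.1 = some p.2) →
  (∀ p ∈ t, d.contains p.1 = false) →
  (t.map Prod.fst).Nodup →
  (t.foldl (fun d p =>
      d.insert p.1 (d.getD p.1 0 + ((PySem.Dict.mk (((PySem.Dict.mk h).get? p.1).getD [])).get? "Deaths").getD 0)) d).items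
    = d.items ++ pairsOf t := by
  intro t
  induction t with
  | nil => intro d _ _ _; simp [pairsOf]
  | cons x t ih =>
    intro d hget hfresh hnd
    simp only [List.foldl_cons]
    have hx : (PySem.Dict.mk h).get? x.1 = some x.2 := hget x List.mem_cons_self
    have hxf : d.contains x.1 = false := hfresh x List.mem_cons_self
    have hgd : d.getD x.1 0 = 0 := PySem.Dict.getD_of_not_contains d 0 hxf
    have hnd' := hnd
    simp only [List.map_cons, List.nodup_cons] at hnd'
    rw [ih (d.insert x.1 (d.getD x.1 0 + ((PySem.Dict.mk (((PySem.Dict.mk h).get? x.1).getD [])).get? "Deaths").getD 0))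
        (fun p hp => hget p (List.mem_cons_of_mem _ hp))
        (fun p hp => by
          rw [PySem.Dict.contains_insert]
          have hne : p.1 ≠ x.1 := by
            intro he
            exact hnd'.1 (he ▸ List.mem_map_of_mem hp)
          simp [hne, hfresh p (List.mem_cons_of_mem _ hp)])
        hnd'.2]
    rw [PySem.Dict.items_insert_of_not_contains _ _ hxf]
    simp [pairsOf, hx, hgd, dOf]

lemma pairsOf_fst (h : List (String × List (String × Int))) :
    (pairsOf h).map Prod.fst = h.map Prod.fst := by
  simp [pairsOf]

-- characterisation of port A as the argmax fold, component-wise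
lemma A_eq (h : List (String × List (String × Int)))
    (hget : ∀ p ∈ h, (PySem.Dict.mk h).get? p.1 = some p.2)
    (hnod : (h.map Prod.fst).Nodup) :
    greatest_numbers_of_deaths h =
      ((Option.map Prod.fst (List.foldl amStep none (pairsOf h))).getD "",
       (Option.map Prod.snd (List.foldl amStep none (pairsOf h))).getD 0) := by
  unfold greatest_numbers_of_deaths
  have hitems :
      (h.foldl (fun d p =>
        d.insert p.1 (d.getD p.1 0 + ((PySem.Dict.mk (((PySem.Dict.mk h).get? p.1).getD [])).get? "Deaths").getD 0))
        PySem.Dict.empty).items = pairsOf h := by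
    simpa using items_fold h h PySem.Dict.empty hget (by simp) hnod
  set D := h.foldl (fun d p =>
      d.insert p.1 (d.getD p.1 0 + ((PySem.Dict.mk (((PySem.Dict.mk h).get? p.1).getD [])).get? "Deaths").getD 0))
      PySem.Dict.empty with hDdef
  show ((PySem.List.max? D.keys fun k => D.getD k 0).getD "", (PySem.List.max? D.values fun v => v).getD 0) =
      ((Option.map Prod.fst (List.foldl amStep none (pairsOf h))).getD "",
       (Option.map Prod.snd (List.foldl amStep none (pairsOf h))).getD 0)
  have hkeys : D.keys = (pairsOf h).map Prod.fst := by
    simp only [PySem.Dict.keys, hitems]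
  have hvals : D.values = (pairsOf h).map Prod.snd := by
    simp only [PySem.Dict.values, hitems]
  have hknd : D.keys.Nodup := by rw [hkeys, pairsOf_fst]; exact hnod
  have hkagree : ∀ p ∈ pairsOf h, D.getD p.1 0 = p.2 := by
    intro p hp
    exact PySem.Dict.getD_of_mem_items D (by rw [hitems]; exact hp) hknd 0
  have h1 := fold_fst (fun k => D.getD k 0) (pairsOf h) none hkagree
    (fun q hq => by exact absurd hq (by simp))
  have h2 := fold_snd (pairsOf h) none
  simp only [Option.map_none] at h1 h2
  rw [hkeys, hvals, max?_key_eq, max?_int_eq, h1, h2]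

-- B's loop is the same argmax fold over the (key, count) pairs
lemma alt_eq (t : List (String × List (String × Int))) :
    ∀ acc, altLoop t acc = List.foldl amStep acc (pairsOf t) := by
  induction t with
  | nil => intro acc; simp [altLoop, pairsOf]
  | cons x t ih =>
    intro acc
    obtain ⟨cane, data⟩ := x
    cases acc with
    | none => simp [altLoop, pairsOf, amStep, dOf, ih]
    | some b => simp [altLoop, pairsOf, amStep, dOf, ih]

-- ===== VERDICT (by name: the statement is the Claim_ definition above) =====
theorem greatest_numbers_of_deaths_spec : Claim_equal_greatest_numbers_of_deaths := by
  intro h _ hpre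
  obtain ⟨hne, hnod, _⟩ := hpre
  have hget : ∀ p ∈ h, (PySem.Dict.mk h).get? p.1 = some p.2 := by
    intro p hp
    exact PySem.Dict.get?_of_mem_items (PySem.Dict.mk h) hp (by simpa [PySem.Dict.keys] using hnod)
  show greatest_numbers_of_deaths h = greatest_numbers_of_deaths_alt h
  rw [A_eq h hget hnod]
  unfold greatest_numbers_of_deaths_alt
  rw [alt_eq]
  obtain ⟨p0, t, rfl⟩ : ∃ p0 t, h = p0 :: t := by
    cases h with
    | nil => exact absurd rfl hne
    | cons a b => exact ⟨a, b, rfl⟩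
  have hcons : pairsOf (p0 :: t) = (p0.1, dOf p0.2) :: pairsOf t := rfl
  rw [hcons]
  simp only [List.foldl_cons, amStep]
  obtain ⟨r, hr⟩ := fold_some (pairsOf t) (p0.1, dOf p0.2)
  rw [hr]
  rfl
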